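-- pv_equiv track=rewrite | github.com/deb-i-am/OnlineSales_QA | Debugging-Task3/debug.py | compute
-- ===== SOURCE A (Python) =====
-- def compute(n):
--     if n < 10:                  #assuming n<10
--         out = n ** 2
--     elif n <=20:                #assuming n>=10 and n<=20
--         out = 1
--         for i in range(1, n-9):  # if n=12, then for i in range(1, n-10) gives 1 so n-10 should be n-9 so that output gives 2 which is the factorial of (n-10)
--             out *= i
--     else:                       #only when n>20
--         lim = n - 20
--         out = 0                 # Initialize out to 0
--         for i in range(1, lim + 1):
--             out += i
--     return out
-- ===== SOURCE B (Python) =====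
-- _FACT = [1, 1, 2, 6, 24, 120, 720, 5040, 40320, 362880, 3628800]
--
-- def compute(n):
--     if n < 10:
--         return n * n
--     if n <= 20:
--         return _FACT[n - 10]
--     m = n - 20
--     return m * (m + 1) // 2
-- ===== Notes on version B (the rewrite author's own statement) =====
-- stated objective: faster
-- what changed: replaced the factorial loop by a precomputed 11-entry table and the summation loop by the closed-form triangular formula m*(m+1)//2, making every branch O(1)
import Mathlib
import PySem

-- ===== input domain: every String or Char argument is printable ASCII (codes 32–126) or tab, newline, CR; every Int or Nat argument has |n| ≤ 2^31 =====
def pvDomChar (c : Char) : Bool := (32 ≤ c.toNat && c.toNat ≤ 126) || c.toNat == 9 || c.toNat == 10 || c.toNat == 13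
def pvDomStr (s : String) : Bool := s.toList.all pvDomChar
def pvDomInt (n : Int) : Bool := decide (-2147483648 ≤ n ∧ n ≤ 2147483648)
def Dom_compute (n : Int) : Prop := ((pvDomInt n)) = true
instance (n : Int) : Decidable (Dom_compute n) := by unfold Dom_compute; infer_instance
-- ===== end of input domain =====

-- B replaces A's factorial and summation loops by a precomputed table and the
-- closed-form triangular formula; every branch is O(1).

-- ===== PORT A =====
def compute (n : Int) : Int :=
  if n < 10 then n ^ 2
  else if n ≤ 20 then
    (PySem.List.pyRange 1 (n - 9) 1).foldl (fun out i => out * i) 1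
  else
    let lim := n - 20
    (PySem.List.pyRange 1 (lim + 1) 1).foldl (fun out i => out + i) 0

-- ===== PORT B =====
def pvFactTable : List Int := [1, 1, 2, 6, 24, 120, 720, 5040, 40320, 362880, 3628800]

def compute_alt (n : Int) : Int :=
  if n < 10 then n * n
  else if n ≤ 20 then
    -- _FACT[n - 10]; the index is always in range (0 ≤ n-10 ≤ 10), so getD 0 is never hit
    (PySem.List.pyGet? pvFactTable (n - 10)).getD 0
  else
    let m := n - 20
    PySem.Int.floordiv (m * (m + 1)) 2

-- ===== PRECONDITION & SPEC =====
def Spec_compute (n : Int) (out : Int) : Prop := out = compute_alt n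
instance (n : Int) (out : Int) : Decidable (Spec_compute n out) := by unfold Spec_compute; infer_instance

-- ===== CLAIM (what is proved, stated in full; the proofs are below) =====
def Claim_equal_compute : Prop := ∀ (n : Int), Dom_compute n → Spec_compute n (compute n)

-- ===== LEMMAS AND PROOFS =====

lemma tri_sum (k : Nat) :
    (PySem.List.pyRange 1 ((k : Int) + 1) 1).foldl (fun out i => out + i) 0
      = PySem.Int.floordiv ((k : Int) * ((k : Int) + 1)) 2 := by
  induction k with
  | zero => decide
  | succ k ih =>
    have hsplit := PySem.List.pyRange_one_succ_right (a := 1) (b := (k : Int) + 1) (by omega)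
    push_cast
    rw [show (k : Int) + 1 + 1 = ((k : Int) + 1) + 1 from rfl, hsplit, List.foldl_append, ih]
    rw [PySem.Int.floordiv_eq_ediv_of_pos (by omega), PySem.Int.floordiv_eq_ediv_of_pos (by omega)]
    simp only [List.foldl]
    have hr : ((k : Int) + 1) * ((k : Int) + 1 + 1) = (k : Int) * ((k : Int) + 1) + 2 * ((k : Int) + 1) := by ring
    omega

theorem compute_spec : Claim_equal_compute := by
  intro n _
  unfold Spec_compute compute compute_alt
  by_cases h1 : n < 10
  · simp [h1]; ring
  · by_cases h2 : n ≤ 20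
    · simp only [h1, h2, if_false, if_true]
      have hlo : (10 : Int) ≤ n := by omega
      interval_cases n <;> decide
    · simp only [h1, h2, if_false]
      have hk : 0 ≤ n - 20 := by omega
      have hke : ((n - 20).toNat : Int) = n - 20 := Int.toNat_of_nonneg hk
      rw [show n - 20 + 1 = ((n - 20).toNat : Int) + 1 by omega, tri_sum ((n - 20).toNat), hke]
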